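-- pv_equiv track=rewrite | github.com/chleved/curseforge-browser | curseforge_parsing.py | find_resource_pack_class
-- ===== SOURCE A (Python) =====
-- def find_resource_pack_class(classes):
--     preferred_slugs = (
--         "texture-packs",
--         "texture_packs",
--         "resource-packs",
--         "resource_packs",
--         "texturepacks",
--     )
--
--     for item in classes:
--         slug = (item.get("slug") or "").lower()
--         if slug in preferred_slugs:
--             return item
--
--     for item in classes:
--         slug = (item.get("slug") or "").lower()
--         name = (item.get("name") or "").lower()
--         if "texture" in slug or "texture" in name or "resource" in slug or "resource" in name:
--             return item
--
--     return None
-- ===== SOURCE B (Python) =====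
-- def find_resource_pack_class(classes):
--     preferred_slugs = (
--         "texture-packs",
--         "texture_packs",
--         "resource-packs",
--         "resource_packs",
--         "texturepacks",
--     )
--     fallback = None
--     for item in classes:
--         slug = (item.get("slug") or "").lower()
--         if slug in preferred_slugs:
--             return item
--         if fallback is None:
--             name = (item.get("name") or "").lower()
--             if "texture" in slug or "texture" in name or "resource" in slug or "resource" in name:
--                 fallback = item
--     return fallback
-- ===== Notes on version B (the rewrite author's own statement) =====
-- stated objective: simpler
-- what changed: Replaces A's two full passes over classes (exact-slug pass, then substring pass) with a single pass that returns an exact slug match immediately and records the first substring match in a fallback variable returned after the loop.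
import Mathlib
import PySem

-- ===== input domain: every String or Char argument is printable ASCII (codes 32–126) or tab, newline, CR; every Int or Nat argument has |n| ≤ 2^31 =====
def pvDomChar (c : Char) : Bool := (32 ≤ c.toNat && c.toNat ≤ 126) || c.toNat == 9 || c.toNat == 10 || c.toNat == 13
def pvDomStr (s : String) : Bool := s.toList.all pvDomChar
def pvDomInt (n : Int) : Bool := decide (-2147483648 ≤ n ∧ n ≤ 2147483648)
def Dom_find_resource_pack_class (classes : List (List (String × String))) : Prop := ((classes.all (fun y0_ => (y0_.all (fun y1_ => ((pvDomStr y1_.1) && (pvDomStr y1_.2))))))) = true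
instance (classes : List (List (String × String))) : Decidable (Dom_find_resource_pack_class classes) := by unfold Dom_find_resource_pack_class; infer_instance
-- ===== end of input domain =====

-- B replaces A's two full passes (exact-slug pass, then substring pass) with a single pass
-- keeping a fallback for the first substring match; objective: simpler.


-- ===== PORT A =====
def pvPreferredSlugs : List String :=
  ["texture-packs", "texture_packs", "resource-packs", "resource_packs", "texturepacks"]

-- slug = (item.get("slug") or "").lower()  — dict lookup is first match on the assoc list
def pvSlug (item : List (String × String)) (key : String) : String :=
  PySem.Str.lower (((PySem.Dict.mk item).get? key).getD "")

-- "texture" in slug or "texture" in name or "resource" in slug or "resource" in name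
def pvSubCond (item : List (String × String)) : Bool :=
  let slug := pvSlug item "slug"
  let name := pvSlug item "name"
  PySem.Str.isIn "texture" slug || PySem.Str.isIn "texture" name ||
  PySem.Str.isIn "resource" slug || PySem.Str.isIn "resource" name

-- first for-loop of A
def pvPassExact : List (List (String × String)) → Option (List (String × String))
  | [] => none
  | item :: rest =>
      if pvPreferredSlugs.contains (pvSlug item "slug") then some item else pvPassExact rest

-- second for-loop of A
def pvPassSub : List (List (String × String)) → Option (List (String × String))
  | [] => none
  | item :: rest => if pvSubCond item then some item else pvPassSub rest

def find_resource_pack_class (classes : List (List (String × String))) : Option (List (String × String)) :=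
  match pvPassExact classes with
  | some item => some item
  | none => pvPassSub classes

-- ===== PORT B =====
-- single pass with a fallback accumulator (Source B's loop)
def pvAltLoop : List (List (String × String)) → Option (List (String × String)) → Option (List (String × String))
  | [], fallback => fallback
  | item :: rest, fallback =>
      if pvPreferredSlugs.contains (pvSlug item "slug") then some item
      else pvAltLoop rest (if fallback = none ∧ pvSubCond item then some item else fallback)

def find_resource_pack_class_alt (classes : List (List (String × String))) : Option (List (String × String)) :=
  pvAltLoop classes none

-- ===== PRECONDITION & SPEC =====
def Spec_find_resource_pack_class (classes : List (List (String × String))) (out : Option (List (String × String))) : Prop := out = find_resource_pack_class_alt classes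
instance (classes : List (List (String × String))) (out : Option (List (String × String))) : Decidable (Spec_find_resource_pack_class classes out) := by unfold Spec_find_resource_pack_class; infer_instance

-- ===== CLAIM (what is proved, stated in full; the proofs are below) =====
def Claim_equal_find_resource_pack_class : Prop := ∀ (classes : List (List (String × String))), Dom_find_resource_pack_class classes → Spec_find_resource_pack_class classes (find_resource_pack_class classes)

-- ===== LEMMAS AND PROOFS =====

-- loop invariant: B's loop is A's exact pass, falling back to the accumulator, then A's substring pass
theorem pvAltLoop_eq (l : List (List (String × String))) (fb : Option (List (String × String))) :
    pvAltLoop l fb = ((pvPassExact l).or (fb.or (pvPassSub l))) := by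
  induction l generalizing fb with
  | nil => simp [pvAltLoop, pvPassExact, pvPassSub]
  | cons item rest ih =>
      simp only [pvAltLoop, pvPassExact, pvPassSub]
      by_cases hx : pvSlug item "slug" ∈ pvPreferredSlugs
      · simp [hx]
      · cases fb <;> by_cases hc : pvSubCond item <;> simp [hx, hc, ih]

-- ===== VERDICT (by name: the statement is the Claim_ definition above) =====

theorem find_resource_pack_class_spec : Claim_equal_find_resource_pack_class := by
  intro classes _
  show find_resource_pack_class classes = find_resource_pack_class_alt classes
  rw [find_resource_pack_class, find_resource_pack_class_alt, pvAltLoop_eq]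
  cases pvPassExact classes <;> simp
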